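-- pv_equiv track=rewrite | github.com/mynameisvinn/Petri | Petri/utils.py | _return_all_neighboring_locs
-- ===== SOURCE A (Python) =====
-- def _return_all_neighboring_locs(loc, env):
--     """return neighboring locs, occupied or unoccupied
--     """
--     n_rows = env["n_rows"]
--     n_cols = env["n_cols"]
--
--     i = loc[0]
--     j = loc[1]
--     neighboring_locs = [(min(i + 1, n_rows - 1), j),
--                         (max(i - 1, 0), j),
--                         (i, min(j + 1, n_cols - 1)),
--                         (i, max(j - 1, 0))]
--
--     neighboring_locs = [l for l in neighboring_locs if l != loc]  # check that neighbor is not itself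
--     return neighboring_locs
-- ===== SOURCE B (Python) =====
-- def _return_all_neighboring_locs(loc, env):
--     """return neighboring locs, occupied or unoccupied
--
--     Recursive single pass over (axis, step) move descriptors, building the
--     output list front-to-back by consing: for each move the coordinate is
--     clamped one-sidedly (min with shape-1 for a positive step, max with 0 for
--     a negative one) and the neighbor is suppressed at construction time when
--     the clamped coordinate equals the cell's own, instead of A's build-four-
--     tuples-then-post-filter pass.
--     """
--     shape = (env["n_rows"], env["n_cols"])
--
--     def go(moves):
--         if not moves:
--             return []
--         (axis, step), rest = moves[0], go(moves[1:])
--         c = loc[axis] + step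
--         c = min(c, shape[axis] - 1) if step > 0 else max(c, 0)
--         if c == loc[axis]:
--             return rest
--         return [(c, loc[1]) if axis == 0 else (loc[0], c)] + rest
--
--     return go([(0, 1), (0, -1), (1, 1), (1, -1)])
-- ===== Notes on version B (the rewrite author's own statement) =====
-- stated objective: alternative
-- what changed: Replaces A's build-four-clamped-candidate-tuples-then-post-filter-out-the-cell-itself pass with a recursive single pass over (axis, step) move descriptors that clamps one-sidedly per step sign, suppresses the self-neighbor at construction time, and builds the result by consing.
import Mathlib
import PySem

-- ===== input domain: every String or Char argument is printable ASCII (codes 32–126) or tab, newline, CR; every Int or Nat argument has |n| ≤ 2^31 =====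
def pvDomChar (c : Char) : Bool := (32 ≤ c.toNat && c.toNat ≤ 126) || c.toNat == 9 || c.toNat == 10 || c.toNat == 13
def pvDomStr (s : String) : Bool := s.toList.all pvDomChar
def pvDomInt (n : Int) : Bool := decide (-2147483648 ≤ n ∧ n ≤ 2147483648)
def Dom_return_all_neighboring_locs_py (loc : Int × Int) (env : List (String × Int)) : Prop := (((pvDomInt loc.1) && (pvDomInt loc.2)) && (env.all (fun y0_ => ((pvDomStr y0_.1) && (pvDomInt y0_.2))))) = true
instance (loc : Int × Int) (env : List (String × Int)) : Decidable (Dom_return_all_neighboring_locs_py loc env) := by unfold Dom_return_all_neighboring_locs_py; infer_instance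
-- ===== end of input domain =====

-- B replaces A's clamp-four-candidates-then-filter-out-self pass with a recursive
-- pass over (axis, step) move descriptors consing surviving neighbors (alternative
-- decomposition, same cost); proved equal to A whenever env carries "n_rows"/"n_cols".


-- ===== PORT A =====
def return_all_neighboring_locs_py (loc : Int × Int) (env : List (String × Int)) : List (Int × Int) :=
  match env.lookup "n_rows", env.lookup "n_cols" with
  | some n_rows, some n_cols =>
    let i := loc.1
    let j := loc.2
    let neighboring_locs : List (Int × Int) :=
      [(min (i + 1) (n_rows - 1), j),
       (max (i - 1) 0, j),
       (i, min (j + 1) (n_cols - 1)),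
       (i, max (j - 1) 0)]
    neighboring_locs.filter (fun l => l ≠ loc)
  | _, _ => []  -- Python raises KeyError here; outside Pre_

-- ===== PORT B =====
-- the inner recursive helper 'go' of Source B (loc[axis]/shape[axis] ported as an axis test)
def goMoves (loc : Int × Int) (shape : Int × Int) : List (Nat × Int) → List (Int × Int)
  | [] => []
  | (axis, step) :: moves =>
    let rest := goMoves loc shape moves
    let x := (if axis = 0 then loc.1 else loc.2) + step
    let c := if step > 0 then min x ((if axis = 0 then shape.1 else shape.2) - 1)
             else max x 0
    if c = (if axis = 0 then loc.1 else loc.2) then rest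
    else (if axis = 0 then (c, loc.2) else (loc.1, c)) :: rest

def return_all_neighboring_locs_py_alt (loc : Int × Int) (env : List (String × Int)) : List (Int × Int) :=
  match env.lookup "n_rows" with
  | none => []  -- Python raises KeyError here; outside Pre_
  | some n_rows =>
    match env.lookup "n_cols" with
    | none => []  -- Python raises KeyError here; outside Pre_
    | some n_cols =>
      goMoves loc (n_rows, n_cols) [(0, 1), (0, -1), (1, 1), (1, -1)]

-- ===== PRECONDITION & SPEC =====
-- A raises KeyError when "n_rows" or "n_cols" is absent from env; Pre_ excludes exactly those inputs.
def Pre_return_all_neighboring_locs_py (loc : Int × Int) (env : List (String × Int)) : Prop :=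
  (env.lookup "n_rows").isSome = true ∧ (env.lookup "n_cols").isSome = true
instance (loc : Int × Int) (env : List (String × Int)) : Decidable (Pre_return_all_neighboring_locs_py loc env) := by unfold Pre_return_all_neighboring_locs_py; infer_instance
def pvWitness_return_all_neighboring_locs_py : (Int × Int) × (List (String × Int)) := ((1, 0), [("n_rows", 3), ("n_cols", 2)])

def Spec_return_all_neighboring_locs_py (loc : Int × Int) (env : List (String × Int)) (out : List (Int × Int)) : Prop := out = return_all_neighboring_locs_py_alt loc env
instance (loc : Int × Int) (env : List (String × Int)) (out : List (Int × Int)) : Decidable (Spec_return_all_neighboring_locs_py loc env out) := by unfold Spec_return_all_neighboring_locs_py; infer_instance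

-- ===== CLAIM (what is proved, stated in full; the proofs are below) =====
def Claim_equal_return_all_neighboring_locs_py : Prop := ∀ (loc : Int × Int) (env : List (String × Int)), Dom_return_all_neighboring_locs_py loc env → Pre_return_all_neighboring_locs_py loc env → Spec_return_all_neighboring_locs_py loc env (return_all_neighboring_locs_py loc env)

-- ===== LEMMAS AND PROOFS =====

lemma goMoves_eval (i j nR nC : Int) :
    goMoves (i, j) (nR, nC) [(0, 1), (0, -1), (1, 1), (1, -1)] =
      (if min (i + 1) (nR - 1) = i then [] else [(min (i + 1) (nR - 1), j)]) ++
      (if max (i - 1) 0 = i then [] else [(max (i - 1) 0, j)]) ++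
      (if min (j + 1) (nC - 1) = j then [] else [(i, min (j + 1) (nC - 1))]) ++
      (if max (j - 1) 0 = j then [] else [(i, max (j - 1) 0)]) := by
  by_cases h1 : min (i + 1) (nR - 1) = i <;>
  by_cases h2 : max (i - 1) 0 = i <;>
  by_cases h3 : min (j + 1) (nC - 1) = j <;>
  by_cases h4 : max (j - 1) 0 = j <;>
    simp [goMoves, ← sub_eq_add_neg, h1, h2, h3, h4]

lemma filterA_eval (i j nR nC : Int) :
    ([(min (i + 1) (nR - 1), j),
      (max (i - 1) 0, j),
      (i, min (j + 1) (nC - 1)),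
      (i, max (j - 1) 0)] : List (Int × Int)).filter (fun l => l ≠ (i, j)) =
      (if min (i + 1) (nR - 1) = i then [] else [(min (i + 1) (nR - 1), j)]) ++
      (if max (i - 1) 0 = i then [] else [(max (i - 1) 0, j)]) ++
      (if min (j + 1) (nC - 1) = j then [] else [(i, min (j + 1) (nC - 1))]) ++
      (if max (j - 1) 0 = j then [] else [(i, max (j - 1) 0)]) := by
  by_cases h1 : min (i + 1) (nR - 1) = i <;>
  by_cases h2 : max (i - 1) 0 = i <;>
  by_cases h3 : min (j + 1) (nC - 1) = j <;>
  by_cases h4 : max (j - 1) 0 = j <;>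
    simp [Prod.ext_iff, h1, h2, h3, h4]

-- ===== VERDICT (by name: the statement is the Claim_ definition above) =====
theorem return_all_neighboring_locs_py_spec : Claim_equal_return_all_neighboring_locs_py := by
  intro ⟨i, j⟩ env _ hpre
  obtain ⟨hs1, hs2⟩ := hpre
  obtain ⟨nR, hR⟩ := Option.isSome_iff_exists.mp hs1
  obtain ⟨nC, hC⟩ := Option.isSome_iff_exists.mp hs2
  unfold Spec_return_all_neighboring_locs_py return_all_neighboring_locs_py return_all_neighboring_locs_py_alt
  simp only [hR, hC, goMoves_eval, filterA_eval]
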